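-- pv_equiv track=rewrite | github.com/JoeLuker/tempo | src/algorithms/rope/position_mapper.py | build_position_map
-- ===== SOURCE A (Python) =====
-- from typing import Dict, List, Tuple, Optional
--
-- def build_position_map(
--
--     token_indices: List[int],
--     position_offset: int = 0
-- ) -> Dict[int, int]:
--     """
--     Build mapping from physical positions to logical positions.
--
--     Args:
--         token_indices: List of token IDs (-1 indicates set boundary)
--         position_offset: Starting position offset
--
--     Returns:
--         Dictionary mapping physical to logical positions
--     """
--     position_map = {}
--     logical_position = position_offset
--     physical_position = position_offset
--
--     for token_idx in token_indices:
--         if token_idx == -1:  # Separator between parallel sets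
--             logical_position += 1
--         else:
--             position_map[physical_position] = logical_position
--             physical_position += 1
--
--     return position_map
-- ===== SOURCE B (Python) =====
-- def build_position_map(token_indices, position_offset=0):
--     # Split into consecutive groups separated by -1 (empty groups preserved),
--     # then assign each group one logical position; physical counter runs through.
--     groups = []
--     cur = []
--     for t in token_indices:
--         if t == -1:
--             groups.append(cur)
--             cur = []
--         else:
--             cur.append(t)
--     groups.append(cur)
--
--     position_map = {}
--     physical = position_offset
--     logical = position_offset
--     for g in groups:
--         for _ in g:
--             position_map[physical] = logical
--             physical += 1
--         logical += 1
--     return position_map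
-- ===== Notes on version B (the rewrite author's own statement) =====
-- stated objective: alternative
-- what changed: B first splits token_indices into groups delimited by -1 (keeping empty groups), then walks the groups with an outer loop that advances the logical position once per group while a single physical counter runs through all groups, instead of A's flat one-pass two-counter scan.
import Mathlib
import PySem

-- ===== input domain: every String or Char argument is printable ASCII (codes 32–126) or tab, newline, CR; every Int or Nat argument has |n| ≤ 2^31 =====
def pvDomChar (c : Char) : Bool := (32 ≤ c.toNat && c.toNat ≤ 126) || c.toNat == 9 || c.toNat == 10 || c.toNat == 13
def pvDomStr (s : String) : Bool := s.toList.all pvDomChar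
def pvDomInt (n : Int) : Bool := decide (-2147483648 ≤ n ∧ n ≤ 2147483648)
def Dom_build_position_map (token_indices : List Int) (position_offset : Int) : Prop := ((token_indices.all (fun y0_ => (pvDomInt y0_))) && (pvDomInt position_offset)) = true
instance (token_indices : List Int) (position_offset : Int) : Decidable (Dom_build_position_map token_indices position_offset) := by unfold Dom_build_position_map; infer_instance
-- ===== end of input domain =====

-- B re-groups the tokens (split on -1, empty groups kept) and assigns logical positions
-- group-by-group; same return value as A's flat two-counter scan (objective: alternative).

-- ===== PORT A =====
-- state = (position_map, logical_position, physical_position), exactly A's loop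
def build_position_map (token_indices : List Int) (position_offset : Int) : List (Int × Int) :=
  let st := token_indices.foldl
    (fun (st : PySem.Dict Int Int × Int × Int) token_idx =>
      if token_idx = -1 then (st.1, st.2.1 + 1, st.2.2)
      else (st.1.insert st.2.2 st.2.1, st.2.1, st.2.2 + 1))
    (PySem.Dict.empty, position_offset, position_offset)
  st.1.items

-- ===== PORT B =====
-- splitting loop of Source B: state = (finished groups, current group)
def pvGroupsB (token_indices : List Int) : List (List Int) :=
  let st := token_indices.foldl
    (fun (st : List (List Int) × List Int) t =>
      if t = -1 then (st.1 ++ [st.2], []) else (st.1, st.2 ++ [t]))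
    ([], [])
  st.1 ++ [st.2]

def build_position_map_alt (token_indices : List Int) (position_offset : Int) : List (Int × Int) :=
  let groups := pvGroupsB token_indices
  -- outer loop state = (position_map, physical, logical)
  let fin := groups.foldl
    (fun (st : PySem.Dict Int Int × Int × Int) g =>
      let inner := g.foldl
        (fun (s : PySem.Dict Int Int × Int) _ => (s.1.insert s.2 st.2.2, s.2 + 1))
        (st.1, st.2.1)
      (inner.1, inner.2, st.2.2 + 1))
    (PySem.Dict.empty, position_offset, position_offset)
  fin.1.items

-- ===== PRECONDITION & SPEC =====
def Spec_build_position_map (token_indices : List Int) (position_offset : Int) (out : List (Int × Int)) : Prop := out = build_position_map_alt token_indices position_offset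
instance (token_indices : List Int) (position_offset : Int) (out : List (Int × Int)) : Decidable (Spec_build_position_map token_indices position_offset out) := by unfold Spec_build_position_map; infer_instance

-- ===== CLAIM (what is proved, stated in full; the proofs are below) =====
def Claim_equal_build_position_map : Prop := ∀ (token_indices : List Int) (position_offset : Int), Dom_build_position_map token_indices position_offset → Spec_build_position_map token_indices position_offset (build_position_map token_indices position_offset)

-- ===== LEMMAS AND PROOFS =====

-- A's loop body / B's loops, as named functions for the proofs
def pvStepA (st : PySem.Dict Int Int × Int × Int) (token_idx : Int) : PySem.Dict Int Int × Int × Int :=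
  if token_idx = -1 then (st.1, st.2.1 + 1, st.2.2)
  else (st.1.insert st.2.2 st.2.1, st.2.1, st.2.2 + 1)

def pvInner (logical : Int) (g : List Int) (s : PySem.Dict Int Int × Int) : PySem.Dict Int Int × Int :=
  g.foldl (fun (s : PySem.Dict Int Int × Int) _ => (s.1.insert s.2 logical, s.2 + 1)) s

def pvOuter (gs : List (List Int)) (st : PySem.Dict Int Int × Int × Int) : PySem.Dict Int Int × Int × Int :=
  gs.foldl
    (fun (st : PySem.Dict Int Int × Int × Int) g =>
      let inner := pvInner st.2.2 g (st.1, st.2.1)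
      (inner.1, inner.2, st.2.2 + 1)) st

-- recursive form of the grouping
def pvG (cur : List Int) : List Int → List (List Int)
  | [] => [cur]
  | t :: r => if t = -1 then cur :: pvG [] r else pvG (cur ++ [t]) r

theorem pvGroups_aux (ts : List Int) : ∀ done cur,
    (let st := ts.foldl
      (fun (st : List (List Int) × List Int) t =>
        if t = -1 then (st.1 ++ [st.2], []) else (st.1, st.2 ++ [t]))
      (done, cur)
     st.1 ++ [st.2]) = done ++ pvG cur ts := by
  induction ts with
  | nil => simp [pvG]
  | cons t r ih =>
    intro done cur
    by_cases h : t = -1 <;> simp [pvG, h, List.foldl_cons, ih]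

theorem pvInner_append (logical : Int) (g : List Int) (t : Int) (s : PySem.Dict Int Int × Int) :
    pvInner logical (g ++ [t]) s =
      ((pvInner logical g s).1.insert (pvInner logical g s).2 logical, (pvInner logical g s).2 + 1) := by
  simp [pvInner, List.foldl_append]

theorem pvMain (ts : List Int) : ∀ (cur : List Int) (d : PySem.Dict Int Int) (log phys : Int),
    (pvOuter (pvG cur ts) (d, phys, log)).1 =
      (ts.foldl pvStepA ((pvInner log cur (d, phys)).1, log, (pvInner log cur (d, phys)).2)).1 := by
  induction ts with
  | nil =>
    intro cur d log phys
    simp [pvG, pvOuter, List.foldl]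
  | cons t r ih =>
    intro cur d log phys
    by_cases h : t = -1
    · subst h
      have : pvOuter (pvG cur ((-1) :: r)) (d, phys, log) =
          pvOuter (pvG [] r) ((pvInner log cur (d, phys)).1, (pvInner log cur (d, phys)).2, log + 1) := by
        simp [pvG, pvOuter, List.foldl_cons]
      rw [this, ih]
      simp [pvStepA, pvInner, List.foldl]
    · have hg : pvG cur (t :: r) = pvG (cur ++ [t]) r := by simp [pvG, h]
      rw [hg, ih]
      simp [pvStepA, h, pvInner_append, List.foldl_cons]

theorem pvGroupsB_eq (ts : List Int) : pvGroupsB ts = pvG [] ts := by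
  simpa using pvGroups_aux ts [] []

-- ===== VERDICT (by name: the statement is the Claim_ definition above) =====
theorem build_position_map_spec : Claim_equal_build_position_map := by
  intro ti off _
  unfold Spec_build_position_map build_position_map build_position_map_alt
  have hO : ∀ gs st, (gs.foldl
      (fun (st : PySem.Dict Int Int × Int × Int) g =>
        let inner := g.foldl
          (fun (s : PySem.Dict Int Int × Int) _ => (s.1.insert s.2 st.2.2, s.2 + 1))
          (st.1, st.2.1)
        (inner.1, inner.2, st.2.2 + 1)) st) = pvOuter gs st := by
    intro gs st; rfl
  have hA : ∀ st, (ti.foldl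
      (fun (st : PySem.Dict Int Int × Int × Int) token_idx =>
        if token_idx = -1 then (st.1, st.2.1 + 1, st.2.2)
        else (st.1.insert st.2.2 st.2.1, st.2.1, st.2.2 + 1)) st) = ti.foldl pvStepA st := by
    intro st; rfl
  simp only [hO, hA, pvGroupsB_eq]
  have := pvMain ti [] PySem.Dict.empty off off
  simp only [pvInner, List.foldl] at this
  rw [this]
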